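-- pv_equiv track=rewrite | github.com/vosslab/bkchem | tools/measure_glyph_bond_alignment.py | _find_candidate_cycles
-- ===== SOURCE A (Python) =====
-- def _canonical_cycle_key(node_indexes: list[int]) -> tuple[int, ...]:
-- 	"""Return rotation- and direction-invariant tuple for one cycle."""
-- 	sequence = tuple(node_indexes)
-- 	reverse_sequence = tuple(reversed(node_indexes))
-- 	candidates = []
-- 	for sequence_variant in (sequence, reverse_sequence):
-- 		for start in range(len(sequence_variant)):
-- 			candidate = sequence_variant[start:] + sequence_variant[:start]
-- 			candidates.append(candidate)
-- 	return min(candidates)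
--
-- def _find_candidate_cycles(adjacency: dict[int, set[int]], min_size: int = 5, max_size: int = 6) -> list[tuple[int, ...]]:
-- 	"""Find simple cycles of allowed sizes in one undirected adjacency graph."""
-- 	cycles: set[tuple[int, ...]] = set()
-- 	for start in sorted(adjacency.keys()):
-- 		stack = [(start, [start])]
-- 		while stack:
-- 			node_value, path = stack.pop()
-- 			if len(path) > max_size:
-- 				continue
-- 			for neighbor in adjacency.get(node_value, set()):
-- 				if neighbor == start and min_size <= len(path) <= max_size:
-- 					cycle = _canonical_cycle_key(path[:])
-- 					cycles.add(cycle)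
-- 					continue
-- 				if neighbor in path:
-- 					continue
-- 				if len(path) >= max_size:
-- 					continue
-- 				stack.append((neighbor, path + [neighbor]))
-- 	return sorted(cycles)
-- ===== SOURCE B (Python) =====
-- def _canonical_cycle_key(node_indexes: list[int]) -> tuple[int, ...]:
-- 	"""Return rotation- and direction-invariant tuple for one cycle."""
-- 	sequence = tuple(node_indexes)
-- 	reverse_sequence = tuple(reversed(node_indexes))
-- 	candidates = []
-- 	for sequence_variant in (sequence, reverse_sequence):
-- 		for start in range(len(sequence_variant)):
-- 			candidate = sequence_variant[start:] + sequence_variant[:start]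
-- 			candidates.append(candidate)
-- 	return min(candidates)
--
-- def _find_candidate_cycles(adjacency: dict[int, set[int]], min_size: int = 5, max_size: int = 6) -> list[tuple[int, ...]]:
-- 	"""Find simple cycles of allowed sizes via a recursive path-extending DFS."""
-- 	cycles: set[tuple[int, ...]] = set()
--
-- 	def extend(start: int, node: int, path: list[int]) -> None:
-- 		for neighbor in adjacency.get(node, set()):
-- 			if neighbor == start and min_size <= len(path) <= max_size:
-- 				cycles.add(_canonical_cycle_key(path))
-- 			elif neighbor not in path and len(path) < max_size:
-- 				extend(start, neighbor, path + [neighbor])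
--
-- 	for start in sorted(adjacency):
-- 		extend(start, start, [start])
-- 	return sorted(cycles)
-- ===== Notes on version B (the rewrite author's own statement) =====
-- stated objective: alternative
-- what changed: A's iterative DFS with an explicit stack of (node, path) entries popped inside a while loop is replaced by a recursive path-extending helper extend(start, node, path) that recurses on each admissible neighbor, so the stack, its push/pop bookkeeping and the post-pop size guard disappear.
import Mathlib
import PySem

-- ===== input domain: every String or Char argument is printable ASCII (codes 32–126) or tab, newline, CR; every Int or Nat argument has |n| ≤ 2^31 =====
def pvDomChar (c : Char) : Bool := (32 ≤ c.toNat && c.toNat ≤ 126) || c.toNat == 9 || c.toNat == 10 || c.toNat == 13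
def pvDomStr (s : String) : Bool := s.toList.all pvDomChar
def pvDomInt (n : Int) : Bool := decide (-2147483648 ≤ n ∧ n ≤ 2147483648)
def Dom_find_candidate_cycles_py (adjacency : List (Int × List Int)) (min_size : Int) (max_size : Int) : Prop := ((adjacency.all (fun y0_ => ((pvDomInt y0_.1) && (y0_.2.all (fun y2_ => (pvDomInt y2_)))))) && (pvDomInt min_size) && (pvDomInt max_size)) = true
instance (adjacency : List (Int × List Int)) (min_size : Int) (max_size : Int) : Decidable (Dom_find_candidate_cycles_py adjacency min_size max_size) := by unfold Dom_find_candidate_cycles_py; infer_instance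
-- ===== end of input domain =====

-- B replaces A's explicit-stack DFS by a recursive path-extending DFS (same cycle set, collected in a
-- different exploration order, then sorted); same asymptotic cost, different decomposition.

-- ===== PORT A =====
-- shared helper: _canonical_cycle_key (identical in Source A and Source B)
def canonical_cycle_key (node_indexes : List Int) : List Int :=
  let sequence := node_indexes
  let reverse_sequence := node_indexes.reverse
  let candidates :=
    [sequence, reverse_sequence].foldl (fun acc sequence_variant =>
      (PySem.List.pyRange 0 (sequence_variant.length : Int)).foldl (fun acc2 start =>
        acc2 ++ [PySem.List.slice sequence_variant (some start) none ++
                 PySem.List.slice sequence_variant none (some start)]) acc) []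
  -- Python `min` raises ValueError on an empty list; both programs only call this with a nonempty
  -- path, where `candidates` is nonempty, so the `.getD []` default is unreachable.
  (PySem.List.min? candidates (fun x => x)).getD []

-- adjacency.get(node, set())
def pyNeighbors (adj : PySem.Dict Int (List Int)) (node : Int) : List Int :=
  PySem.Dict.getD adj node []

-- body of A's `for neighbor in adjacency.get(node_value, set())` loop, over the state (cycles, stack)
def aBody (start min_size max_size : Int) (path : List Int)
    (s : PySem.Set (List Int) × List (Int × List Int)) (neighbor : Int) :
    PySem.Set (List Int) × List (Int × List Int) :=
  if neighbor = start ∧ min_size ≤ (path.length : Int) ∧ (path.length : Int) ≤ max_size then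
    (PySem.Set.add s.1 (canonical_cycle_key path), s.2)
  else if neighbor ∈ path then s
  else if (path.length : Int) ≥ max_size then s
  else (s.1, (neighbor, path ++ [neighbor]) :: s.2)

-- termination measure for A's while loop: each pushed path is one longer, and at most
-- `adjBound` entries are pushed per pop
def adjBound (adj : PySem.Dict Int (List Int)) : Nat :=
  (adj.items.map (fun p => p.2.length)).sum

def entryWeight (N M : Nat) (p : List Int) : Nat := (N + 1) ^ (M - p.length)

def stackWeight (N M : Nat) (stack : List (Int × List Int)) : Nat :=
  (stack.map (fun e => entryWeight N M e.2)).sum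

theorem pyNeighbors_length_le (adj : PySem.Dict Int (List Int)) (node : Int) :
    (pyNeighbors adj node).length ≤ adjBound adj := by
  unfold pyNeighbors adjBound PySem.Dict.getD PySem.Dict.get?
  cases h : adj.items.find? (fun p => p.1 == node) with
  | none => simp
  | some p =>
    simp only [Option.map_some, Option.getD_some]
    exact List.le_sum_of_mem (List.mem_map_of_mem (List.mem_of_find?_eq_some h))

theorem aBody_foldl_stack_of_ge (start min_size max_size : Int) (path : List Int)
    (hge : (path.length : Int) ≥ max_size) :
    ∀ (nbs : List Int) (st : PySem.Set (List Int) × List (Int × List Int)),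
      (nbs.foldl (aBody start min_size max_size path) st).2 = st.2 := by
  intro nbs
  induction nbs with
  | nil => intro st; rfl
  | cons nb rest ih =>
    intro st
    rw [List.foldl_cons, ih]
    unfold aBody
    split_ifs <;> simp_all

theorem aBody_foldl_stack_weight (N M : Nat) (start min_size max_size : Int) (path : List Int) :
    ∀ (nbs : List Int) (st : PySem.Set (List Int) × List (Int × List Int)),
      stackWeight N M (nbs.foldl (aBody start min_size max_size path) st).2 ≤
        stackWeight N M st.2 + nbs.length * (N + 1) ^ (M - (path.length + 1)) := by
  intro nbs
  induction nbs with
  | nil => intro st; simp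
  | cons nb rest ih =>
    intro st
    rw [List.foldl_cons]
    calc stackWeight N M (rest.foldl (aBody start min_size max_size path)
            (aBody start min_size max_size path st nb)).2
        ≤ stackWeight N M (aBody start min_size max_size path st nb).2 +
            rest.length * (N + 1) ^ (M - (path.length + 1)) := ih _
      _ ≤ stackWeight N M st.2 + (nb :: rest).length * (N + 1) ^ (M - (path.length + 1)) := by
          unfold aBody
          split_ifs <;> simp [stackWeight, entryWeight, List.length_cons] <;> ring_nf <;> omega

-- A's while loop (stack held head-on-top: Python's append/pop() work at the same end)
def a_loop (adj : PySem.Dict Int (List Int)) (start min_size max_size : Int) :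
    List (Int × List Int) → PySem.Set (List Int) → PySem.Set (List Int)
  | [], cycles => cycles
  | (node, path) :: rest, cycles =>
    if (path.length : Int) > max_size then
      a_loop adj start min_size max_size rest cycles
    else
      match hfe : (pyNeighbors adj node).foldl (aBody start min_size max_size path) (cycles, rest) with
      | (cycles2, stack2) => a_loop adj start min_size max_size stack2 cycles2
termination_by stack _ => stackWeight (adjBound adj) max_size.toNat stack
decreasing_by
  · simp only [stackWeight, List.map_cons, List.sum_cons]
    have : 0 < entryWeight (adjBound adj) max_size.toNat path := pow_pos (by omega) _
    omega
  · have hs : stack2 =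
        ((pyNeighbors adj node).foldl (aBody start min_size max_size path) (cycles, rest)).2 := by
      rw [hfe]
    rw [hs]
    simp only [stackWeight, List.map_cons, List.sum_cons]
    by_cases hge : (path.length : Int) ≥ max_size
    · rw [aBody_foldl_stack_of_ge _ _ _ _ hge]
      have : 0 < entryWeight (adjBound adj) max_size.toNat path := pow_pos (by omega) _
      simp only [stackWeight]
      omega
    · have hlt : path.length < max_size.toNat := by omega
      have h1 := aBody_foldl_stack_weight (adjBound adj) max_size.toNat start min_size max_size path
        (pyNeighbors adj node) (cycles, rest)
      have h2 : (pyNeighbors adj node).length ≤ adjBound adj := pyNeighbors_length_le adj node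
      have h3 : entryWeight (adjBound adj) max_size.toNat path =
          (adjBound adj + 1) * (adjBound adj + 1) ^ (max_size.toNat - (path.length + 1)) := by
        unfold entryWeight
        rw [← pow_succ']
        congr 1
        omega
      have h4 : 0 < (adjBound adj + 1) ^ (max_size.toNat - (path.length + 1)) :=
        pow_pos (by omega) _
      have h5 : (pyNeighbors adj node).length * (adjBound adj + 1) ^ (max_size.toNat - (path.length + 1)) ≤
          adjBound adj * (adjBound adj + 1) ^ (max_size.toNat - (path.length + 1)) :=
        Nat.mul_le_mul_right _ h2
      have h6 : (adjBound adj + 1) * (adjBound adj + 1) ^ (max_size.toNat - (path.length + 1)) =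
          adjBound adj * (adjBound adj + 1) ^ (max_size.toNat - (path.length + 1)) +
          (adjBound adj + 1) ^ (max_size.toNat - (path.length + 1)) := by ring
      simp only [stackWeight] at h1 ⊢
      omega

def find_candidate_cycles_py (adjacency : List (Int × List Int)) (min_size : Int) (max_size : Int) :
    List (List Int) :=
  let adj := PySem.Dict.ofList adjacency
  let cycles : PySem.Set (List Int) :=
    (PySem.List.sorted (PySem.Dict.keys adj) (fun x => x)).foldl
      (fun cyc start => a_loop adj start min_size max_size [(start, [start])] cyc)
      PySem.Set.empty
  PySem.List.sorted cycles (fun x => x)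

-- ===== PORT B =====
mutual
-- Source B's recursive extend(start, node, path): walk the neighbours of `node`
def b_extend (adj : PySem.Dict Int (List Int)) (start min_size max_size : Int)
    (node : Int) (path : List Int) (cycles : PySem.Set (List Int)) : PySem.Set (List Int) :=
  b_nb_loop adj start min_size max_size (pyNeighbors adj node) path cycles
termination_by (max_size.toNat - path.length, (pyNeighbors adj node).length + 1)

-- the `for neighbor in adjacency.get(node, set())` loop inside extend
def b_nb_loop (adj : PySem.Dict Int (List Int)) (start min_size max_size : Int) :
    List Int → List Int → PySem.Set (List Int) → PySem.Set (List Int)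
  | [], _, cycles => cycles
  | neighbor :: rest, path, cycles =>
    if neighbor = start ∧ min_size ≤ (path.length : Int) ∧ (path.length : Int) ≤ max_size then
      b_nb_loop adj start min_size max_size rest path
        (PySem.Set.add cycles (canonical_cycle_key path))
    else if neighbor ∉ path ∧ (path.length : Int) < max_size then
      b_nb_loop adj start min_size max_size rest path
        (b_extend adj start min_size max_size neighbor (path ++ [neighbor]) cycles)
    else
      b_nb_loop adj start min_size max_size rest path cycles
termination_by nbs path _ => (max_size.toNat - path.length, nbs.length)
end

def find_candidate_cycles_py_alt (adjacency : List (Int × List Int)) (min_size : Int)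
    (max_size : Int) : List (List Int) :=
  let adj := PySem.Dict.ofList adjacency
  let cycles : PySem.Set (List Int) :=
    (PySem.List.sorted (PySem.Dict.keys adj) (fun x => x)).foldl
      (fun cyc start => b_extend adj start min_size max_size start [start] cyc)
      PySem.Set.empty
  PySem.List.sorted cycles (fun x => x)

-- ===== PRECONDITION & SPEC =====
def Spec_find_candidate_cycles_py (adjacency : List (Int × List Int)) (min_size : Int) (max_size : Int) (out : List (List Int)) : Prop := out = find_candidate_cycles_py_alt adjacency min_size max_size
instance (adjacency : List (Int × List Int)) (min_size : Int) (max_size : Int) (out : List (List Int)) : Decidable (Spec_find_candidate_cycles_py adjacency min_size max_size out) := by unfold Spec_find_candidate_cycles_py; infer_instance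

-- ===== CLAIM (what is proved, stated in full; the proofs are below) =====
def Claim_equal_find_candidate_cycles_py : Prop := ∀ (adjacency : List (Int × List Int)) (min_size : Int) (max_size : Int), Dom_find_candidate_cycles_py adjacency min_size max_size → Spec_find_candidate_cycles_py adjacency min_size max_size (find_candidate_cycles_py adjacency min_size max_size)

-- ===== LEMMAS AND PROOFS =====

-- reference enumeration of the cycle keys discoverable from one (node, path) DFS state:
-- both the stack loop of A and the recursion of B insert exactly these keys
mutual
def g_ext (adj : PySem.Dict Int (List Int)) (start min_size max_size : Int)
    (node : Int) (path : List Int) : List (List Int) :=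
  g_loop adj start min_size max_size (pyNeighbors adj node) path
termination_by (max_size.toNat - path.length, (pyNeighbors adj node).length + 1)

def g_loop (adj : PySem.Dict Int (List Int)) (start min_size max_size : Int) :
    List Int → List Int → List (List Int)
  | [], _ => []
  | neighbor :: rest, path =>
    (if neighbor = start ∧ min_size ≤ (path.length : Int) ∧ (path.length : Int) ≤ max_size then
      [canonical_cycle_key path]
    else if neighbor ∉ path ∧ (path.length : Int) < max_size then
      g_ext adj start min_size max_size neighbor (path ++ [neighbor])
    else []) ++ g_loop adj start min_size max_size rest path
termination_by nbs path => (max_size.toNat - path.length, nbs.length)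
end

theorem g_loop_of_gt (adj : PySem.Dict Int (List Int)) (start min_size max_size : Int)
    (path : List Int) (hgt : (path.length : Int) > max_size) :
    ∀ nbs : List Int, g_loop adj start min_size max_size nbs path = [] := by
  intro nbs
  induction nbs with
  | nil => rw [g_loop]
  | cons nb rest ih =>
    rw [g_loop]
    split_ifs with h1 h2
    · exact absurd h1.2.2 (by omega)
    · exact absurd h2.2 (by omega)
    · simpa using ih

theorem b_nb_loop_mem (adj : PySem.Dict Int (List Int)) (start min_size max_size : Int) :
    ∀ (k : Nat) (path : List Int), max_size.toNat - path.length ≤ k →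
    ∀ (nbs : List Int) (c : PySem.Set (List Int)) (x : List Int),
      x ∈ b_nb_loop adj start min_size max_size nbs path c ↔
        x ∈ c ∨ x ∈ g_loop adj start min_size max_size nbs path := by
  intro k
  induction k using Nat.strong_induction_on with
  | _ k ih =>
    intro path hp nbs
    induction nbs with
    | nil => intro c x; rw [b_nb_loop, g_loop]; simp
    | cons nb rest ihn =>
      intro c x
      rw [b_nb_loop, g_loop]
      split_ifs with h1 h2
      · rw [ihn]
        simp only [PySem.Set.mem_add, List.mem_append, List.mem_singleton]
        tauto
      · have hplen : path.length < max_size.toNat := by omega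
        have hext : ∀ (c : PySem.Set (List Int)) (x : List Int),
            x ∈ b_extend adj start min_size max_size nb (path ++ [nb]) c ↔
              x ∈ c ∨ x ∈ g_ext adj start min_size max_size nb (path ++ [nb]) := by
          intro c x
          rw [b_extend, g_ext]
          exact ih (max_size.toNat - (path.length + 1)) (by omega) (path ++ [nb])
            (by simp only [List.length_append, List.length_cons, List.length_nil]; omega) _ c x
        rw [ihn, hext]
        simp only [List.mem_append]
        tauto
      · rw [ihn]
        simp only [List.mem_append, List.not_mem_nil]
        tauto

theorem b_extend_mem (adj : PySem.Dict Int (List Int)) (start min_size max_size : Int)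
    (node : Int) (path : List Int) (c : PySem.Set (List Int)) (x : List Int) :
    x ∈ b_extend adj start min_size max_size node path c ↔
      x ∈ c ∨ x ∈ g_ext adj start min_size max_size node path := by
  rw [b_extend, g_ext]
  exact b_nb_loop_mem adj start min_size max_size (max_size.toNat - path.length) path le_rfl
    _ c x

theorem b_nb_loop_nodup (adj : PySem.Dict Int (List Int)) (start min_size max_size : Int) :
    ∀ (k : Nat) (path : List Int), max_size.toNat - path.length ≤ k →
    ∀ (nbs : List Int) (c : PySem.Set (List Int)), c.Nodup →
      (b_nb_loop adj start min_size max_size nbs path c).Nodup := by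
  intro k
  induction k using Nat.strong_induction_on with
  | _ k ih =>
    intro path hp nbs
    induction nbs with
    | nil => intro c hc; rw [b_nb_loop]; exact hc
    | cons nb rest ihn =>
      intro c hc
      rw [b_nb_loop]
      split_ifs with h1 h2
      · exact ihn _ (PySem.Set.nodup_add _ _ hc)
      · have hplen : path.length < max_size.toNat := by omega
        refine ihn _ ?_
        rw [b_extend]
        exact ih (max_size.toNat - (path.length + 1)) (by omega) (path ++ [nb])
          (by simp only [List.length_append, List.length_cons, List.length_nil]; omega) _ c hc
      · exact ihn _ hc

theorem aBody_foldl_mem (adj : PySem.Dict Int (List Int)) (start min_size max_size : Int)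
    (path : List Int) :
    ∀ (nbs : List Int) (st : PySem.Set (List Int) × List (Int × List Int)) (x : List Int),
      (x ∈ (nbs.foldl (aBody start min_size max_size path) st).1 ∨
        ∃ e ∈ (nbs.foldl (aBody start min_size max_size path) st).2,
          x ∈ g_ext adj start min_size max_size e.1 e.2) ↔
      ((x ∈ st.1 ∨ ∃ e ∈ st.2, x ∈ g_ext adj start min_size max_size e.1 e.2) ∨
        x ∈ g_loop adj start min_size max_size nbs path) := by
  intro nbs
  induction nbs with
  | nil => intro st x; rw [g_loop]; simp
  | cons nb rest ih =>
    intro st x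
    rw [List.foldl_cons, g_loop, ih]
    unfold aBody
    by_cases h1 : nb = start ∧ min_size ≤ (path.length : Int) ∧ (path.length : Int) ≤ max_size
    · simp only [if_pos h1, PySem.Set.mem_add, List.mem_append, List.mem_singleton]
      aesop
    · simp only [if_neg h1]
      by_cases h2 : nb ∈ path
      · have hc : ¬(nb ∉ path ∧ (path.length : Int) < max_size) := by tauto
        simp only [if_pos h2, if_neg hc, List.nil_append, List.mem_append]
      · simp only [if_neg h2]
        by_cases h3 : (path.length : Int) ≥ max_size
        · have hc : ¬(nb ∉ path ∧ (path.length : Int) < max_size) := by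
            intro h; omega
          simp only [if_pos h3, if_neg hc, List.nil_append, List.mem_append]
        · have hc : nb ∉ path ∧ (path.length : Int) < max_size := ⟨h2, by omega⟩
          simp only [if_neg h3, if_pos hc, List.mem_append, List.mem_cons]
          aesop

theorem a_loop_mem (adj : PySem.Dict Int (List Int)) (start min_size max_size : Int) :
    ∀ (stack : List (Int × List Int)) (c : PySem.Set (List Int)) (x : List Int),
      x ∈ a_loop adj start min_size max_size stack c ↔
        x ∈ c ∨ ∃ e ∈ stack, x ∈ g_ext adj start min_size max_size e.1 e.2 := by
  intro stack c x
  fun_induction a_loop adj start min_size max_size stack c with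
  | case1 cycles => simp
  | case2 node path rest cycles hgt ih =>
    have hnil : g_ext adj start min_size max_size node path = [] := by
      rw [g_ext]; exact g_loop_of_gt _ _ _ _ _ (by omega) _
    rw [ih]
    simp only [List.mem_cons]
    constructor
    · rintro (h | ⟨e, he, hx⟩)
      · exact Or.inl h
      · exact Or.inr ⟨e, Or.inr he, hx⟩
    · rintro (h | ⟨e, (rfl | he), hx⟩)
      · exact Or.inl h
      · exact absurd hx (by simp [hnil])
      · exact Or.inr ⟨e, he, hx⟩
  | case3 node path rest cycles hgt cycles2 stack2 heq ih =>
    rw [ih]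
    have hfold := aBody_foldl_mem adj start min_size max_size path (pyNeighbors adj node)
      (cycles, rest) x
    rw [heq] at hfold
    dsimp only at hfold
    rw [hfold]
    have hg : g_ext adj start min_size max_size node path =
        g_loop adj start min_size max_size (pyNeighbors adj node) path := by rw [g_ext]
    simp only [List.mem_cons, ← hg]
    aesop

theorem aBody_foldl_nodup (start min_size max_size : Int) (path : List Int) :
    ∀ (nbs : List Int) (st : PySem.Set (List Int) × List (Int × List Int)), st.1.Nodup →
      (nbs.foldl (aBody start min_size max_size path) st).1.Nodup := by
  intro nbs
  induction nbs with
  | nil => intro st h; exact h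
  | cons nb rest ih =>
    intro st h
    rw [List.foldl_cons]
    refine ih _ ?_
    unfold aBody
    split_ifs <;> first | exact h | exact PySem.Set.nodup_add _ _ h

theorem a_loop_nodup (adj : PySem.Dict Int (List Int)) (start min_size max_size : Int) :
    ∀ (stack : List (Int × List Int)) (c : PySem.Set (List Int)), c.Nodup →
      (a_loop adj start min_size max_size stack c).Nodup := by
  intro stack c
  fun_induction a_loop adj start min_size max_size stack c with
  | case1 cycles => exact fun h => h
  | case2 node path rest cycles hgt ih => exact ih
  | case3 node path rest cycles hgt cycles2 stack2 heq ih =>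
    intro h
    have hnd := aBody_foldl_nodup start min_size max_size path (pyNeighbors adj node)
      (cycles, rest) h
    rw [heq] at hnd
    exact ih hnd

theorem sorted_decidable_congr {α κ : Type} [LT κ] (d1 d2 : DecidableLT κ) (xs : List α)
    (key : α → κ) :
    @PySem.List.sorted α κ _ d1 xs key false = @PySem.List.sorted α κ _ d2 xs key false := by
  rw [@PySem.List.sorted_eq_foldl_insertBy α κ _ d1, @PySem.List.sorted_eq_foldl_insertBy α κ _ d2]
  congr 1
  funext acc a
  congr 1
  funext p q
  exact decide_eq_decide.mpr Iff.rfl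

theorem keys_foldl_mem (adj : PySem.Dict Int (List Int)) (min_size max_size : Int)
    (F : PySem.Set (List Int) → Int → PySem.Set (List Int))
    (hF : ∀ (c : PySem.Set (List Int)) (s : Int) (x : List Int),
      x ∈ F c s ↔ x ∈ c ∨ x ∈ g_ext adj s min_size max_size s [s]) :
    ∀ (keys : List Int) (c : PySem.Set (List Int)) (x : List Int),
      x ∈ keys.foldl F c ↔ x ∈ c ∨ ∃ s ∈ keys, x ∈ g_ext adj s min_size max_size s [s] := by
  intro keys
  induction keys with
  | nil => intro c x; simp
  | cons s rest ih =>
    intro c x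
    rw [List.foldl_cons, ih, hF]
    simp only [List.mem_cons]
    aesop

theorem keys_foldl_nodup (F : PySem.Set (List Int) → Int → PySem.Set (List Int))
    (hF : ∀ (c : PySem.Set (List Int)) (s : Int), c.Nodup → (F c s).Nodup) :
    ∀ (keys : List Int) (c : PySem.Set (List Int)), c.Nodup → (keys.foldl F c).Nodup := by
  intro keys
  induction keys with
  | nil => intro c h; exact h
  | cons s rest ih => intro c h; exact ih _ (hF _ _ h)

-- ===== VERDICT (by name: the statement is the Claim_ definition above) =====
theorem find_candidate_cycles_py_spec : Claim_equal_find_candidate_cycles_py := by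
  intro adjacency min_size max_size _
  unfold Spec_find_candidate_cycles_py
  simp only [find_candidate_cycles_py, find_candidate_cycles_py_alt]
  have hFA : ∀ (c : PySem.Set (List Int)) (s : Int) (x : List Int),
      x ∈ a_loop (PySem.Dict.ofList adjacency) s min_size max_size [(s, [s])] c ↔
        x ∈ c ∨ x ∈ g_ext (PySem.Dict.ofList adjacency) s min_size max_size s [s] := by
    intro c s x
    rw [a_loop_mem]
    simp
  have hFB : ∀ (c : PySem.Set (List Int)) (s : Int) (x : List Int),
      x ∈ b_extend (PySem.Dict.ofList adjacency) s min_size max_size s [s] c ↔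
        x ∈ c ∨ x ∈ g_ext (PySem.Dict.ofList adjacency) s min_size max_size s [s] :=
    fun c s x => b_extend_mem _ _ _ _ _ _ _ _
  have hmemA := keys_foldl_mem (PySem.Dict.ofList adjacency) min_size max_size _ hFA
    (PySem.List.sorted (PySem.Dict.keys (PySem.Dict.ofList adjacency)) (fun x => x))
    PySem.Set.empty
  have hmemB := keys_foldl_mem (PySem.Dict.ofList adjacency) min_size max_size _ hFB
    (PySem.List.sorted (PySem.Dict.keys (PySem.Dict.ofList adjacency)) (fun x => x))
    PySem.Set.empty
  have hndA := keys_foldl_nodup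
    (fun c s => a_loop (PySem.Dict.ofList adjacency) s min_size max_size [(s, [s])] c)
    (fun c s hc => a_loop_nodup _ s min_size max_size _ c hc)
    (PySem.List.sorted (PySem.Dict.keys (PySem.Dict.ofList adjacency)) (fun x => x))
    PySem.Set.empty List.nodup_nil
  have hBnodup : ∀ (c : PySem.Set (List Int)) (s : Int), c.Nodup →
      (b_extend (PySem.Dict.ofList adjacency) s min_size max_size s [s] c).Nodup := by
    intro c s hc
    rw [b_extend]
    exact b_nb_loop_nodup _ s min_size max_size (max_size.toNat - 1) [s] (by simp) _ c hc
  have hndB := keys_foldl_nodup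
    (fun c s => b_extend (PySem.Dict.ofList adjacency) s min_size max_size s [s] c)
    hBnodup
    (PySem.List.sorted (PySem.Dict.keys (PySem.Dict.ofList adjacency)) (fun x => x))
    PySem.Set.empty List.nodup_nil
  have hperm := (List.perm_ext_iff_of_nodup hndA hndB).mpr
    (fun a => by rw [hmemA a, hmemB a])
  exact (sorted_decidable_congr _ (@LinearOrder.toDecidableLT _ List.instLinearOrder) _ _).trans
    ((PySem.List.sorted_eq_sorted_of_perm _ _ _ (fun a b h => h) hperm).trans
      (sorted_decidable_congr _ (@LinearOrder.toDecidableLT _ List.instLinearOrder) _ _).symm)
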